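-- pv_equiv track=rewrite | github.com/Pasqua101/txt-to-HTML-converter | md-to-html/md_to_html.py | get_code_block
-- ===== SOURCE A (Python) =====
-- def get_code_block(html_content_lines:list[str,]):
--     '''
--     this function converts multiline code block into html.
--     previously it was done by regex but it was not working properly
--     '''
--     html_content = ""
--     block_end = 0
--     for index, line in enumerate(html_content_lines):
--         if '```' not in line:
--             html_content += line + '\n'
--         else:
--             block_end = index
--             break
--
--     code = f'<pre><code class="block-code">{html_content}</code></pre>'
--
--     return code, block_end
-- ===== SOURCE B (Python) =====
-- def get_code_block(html_content_lines):
--     '''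
--     Locate the closing fence first, then build the body from the prefix in one join.
--     '''
--     idx = next((i for i, line in enumerate(html_content_lines) if '```' in line), None)
--     body = ''.join(line + '\n' for line in html_content_lines[:idx])
--     return f'<pre><code class="block-code">{body}</code></pre>', idx if idx is not None else 0
-- ===== Notes on version B (the rewrite author's own statement) =====
-- stated objective: simpler
-- what changed: B replaces A's single accumulate-and-break loop with two separate passes: first locate the fence index with next/enumerate, then build the body with one join over the prefix slice (lines[:idx] keeps everything when there is no fence, matching A's block_end=0 no-fence case).
import Mathlib
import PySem

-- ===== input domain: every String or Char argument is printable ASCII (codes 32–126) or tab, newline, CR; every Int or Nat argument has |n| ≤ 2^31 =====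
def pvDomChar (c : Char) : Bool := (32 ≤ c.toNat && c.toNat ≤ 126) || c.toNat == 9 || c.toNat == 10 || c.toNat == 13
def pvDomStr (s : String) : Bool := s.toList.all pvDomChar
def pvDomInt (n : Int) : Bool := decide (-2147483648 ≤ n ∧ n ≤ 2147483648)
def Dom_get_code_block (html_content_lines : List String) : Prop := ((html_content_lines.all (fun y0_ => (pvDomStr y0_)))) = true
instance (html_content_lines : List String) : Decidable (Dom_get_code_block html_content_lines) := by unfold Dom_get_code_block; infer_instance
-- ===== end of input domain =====

-- B replaces A's single accumulate-and-break loop by two passes (locate the fence index, then join the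
-- prefix); same output, same cost — objective: simpler decomposition.

-- ===== PORT A =====
-- A's for-loop with break: accumulates html and returns at the fence (block_end stays 0 if none).
def get_code_block_loop (lines : List String) (index : Nat) (html : String) : String × Int :=
  match lines with
  | [] => (html, 0)
  | line :: rest =>
    if PySem.Str.isIn "```" line = false then
      get_code_block_loop rest (index + 1) (html ++ (line ++ "\n"))
    else (html, (index : Int))

def get_code_block (html_content_lines : List String) : String × Int :=
  let r := get_code_block_loop html_content_lines 0 ""
  ("<pre><code class=\"block-code\">" ++ r.1 ++ "</code></pre>", r.2)

-- ===== PORT B =====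
-- next((i for i, line in enumerate(lines) if '```' in line), None)
def fence_idx (lines : List String) (i : Nat) : Option Nat :=
  match lines with
  | [] => none
  | line :: rest => if PySem.Str.isIn "```" line then some i else fence_idx rest (i + 1)

def get_code_block_alt (html_content_lines : List String) : String × Int :=
  let idx := fence_idx html_content_lines 0
  -- lines[:idx]: Python slice with a nonnegative index is List.take; lines[:None] is the whole list
  let prefixLines := match idx with
    | none => html_content_lines
    | some i => html_content_lines.take i
  let body := PySem.Str.join "" (prefixLines.map (fun line => line ++ "\n"))
  ("<pre><code class=\"block-code\">" ++ body ++ "</code></pre>",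
   match idx with | none => 0 | some i => (i : Int))

-- ===== PRECONDITION & SPEC =====
def Spec_get_code_block (html_content_lines : List String) (out : String × Int) : Prop := out = get_code_block_alt html_content_lines
instance (html_content_lines : List String) (out : String × Int) : Decidable (Spec_get_code_block html_content_lines out) := by unfold Spec_get_code_block; infer_instance

-- ===== CLAIM (what is proved, stated in full; the proofs are below) =====
def Claim_equal_get_code_block : Prop := ∀ (html_content_lines : List String), Dom_get_code_block html_content_lines → Spec_get_code_block html_content_lines (get_code_block html_content_lines)

-- ===== LEMMAS AND PROOFS =====
theorem pv_join_nil : PySem.Str.join "" ([] : List String) = "" := rfl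

theorem pv_join_cons (x : String) (xs : List String) :
    PySem.Str.join "" (x :: xs) = x ++ PySem.Str.join "" xs := by
  cases xs <;> simp [PySem.Str.join, PySem.Chars.join, List.intercalate, String.ofList_append]

-- A's loop equals B's locate-then-join on any accumulator and start index.
theorem pv_loop_eq (lines : List String) :
    ∀ (i : Nat) (html : String),
      get_code_block_loop lines i html =
        (html ++ PySem.Str.join "" ((match fence_idx lines 0 with
            | none => lines
            | some k => lines.take k).map (fun line => line ++ "\n")),
         match fence_idx lines 0 with | none => (0 : Int) | some k => ((k + i : Nat) : Int)) := by
  induction lines with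
  | nil => intro i html; simp [get_code_block_loop, fence_idx, pv_join_nil]
  | cons line rest ih =>
    intro i html
    by_cases h : PySem.Chars.isIn ['`', '`', '`'] line.toList = true
    · simp [get_code_block_loop, fence_idx, PySem.Str.isIn, h, pv_join_nil]
    · have hshift : ∀ (l : List String) (j : Nat), fence_idx l (j + 1) = (fence_idx l j).map (· + 1) := by
        intro l
        induction l with
        | nil => intro j; simp [fence_idx]
        | cons a t iht =>
          intro j
          by_cases ha : PySem.Chars.isIn ['`', '`', '`'] a.toList = true
          · simp [fence_idx, PySem.Str.isIn, ha]
          · simp only [fence_idx]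
            rw [if_neg (by simpa [PySem.Str.isIn] using ha), if_neg (by simpa [PySem.Str.isIn] using ha)]
            exact iht (j + 1)
      simp only [get_code_block_loop, fence_idx]
      rw [if_pos (by simpa [PySem.Str.isIn] using h), if_neg (by simpa [PySem.Str.isIn] using h),
        hshift rest 0, ih (i + 1) (html ++ (line ++ "\n"))]
      cases hf : fence_idx rest 0 with
      | none => simp [pv_join_cons, String.append_assoc]
      | some k =>
        simp [pv_join_cons, String.append_assoc, List.take_succ_cons]
        ring

-- ===== VERDICT (by name: the statement is the Claim_ definition above) =====
theorem get_code_block_spec : Claim_equal_get_code_block := by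
  intro lines _
  unfold Spec_get_code_block get_code_block get_code_block_alt
  rw [pv_loop_eq lines 0 ""]
  cases fence_idx lines 0 <;> simp
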